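-- pv_equiv track=rewrite | github.com/HimanshuKumar17052001/AR | extract_tables.py | determine_consolidated_status
-- ===== SOURCE A (Python) =====
-- from typing import List, Dict, Any, Optional
--
-- def determine_consolidated_status(
--     page_num: int,
--     all_page_phrases: Dict[int, List[str]],
--     current_page_phrases: List[str],
-- ) -> bool:
--     """Determine if a page should be labeled as consolidated based on position after standalone Cash Flow Statement."""
--     # Get all page numbers sorted
--     all_pages = sorted(all_page_phrases.keys())
--
--     # Find the first Consolidated Balance Sheet page
--     consolidated_balance_sheet_page = None
--     for page in all_pages:
--         phrases = all_page_phrases[page]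
--         if any("consolidated balance sheet" in phrase.lower() for phrase in phrases):
--             consolidated_balance_sheet_page = page
--             break  # First occurrence of consolidated balance sheet
--
--     # If no Consolidated Balance Sheet found, everything is standalone
--     if consolidated_balance_sheet_page is None:
--         return False
--
--     # Everything after and including the Consolidated Balance Sheet is consolidated
--     return page_num >= consolidated_balance_sheet_page
-- ===== SOURCE B (Python) =====
-- def determine_consolidated_status(page_num, all_page_phrases, current_page_phrases):
--     """Single pass over the dict: keep the minimum page containing
--     'consolidated balance sheet'; no sort, no second scan."""
--     best = None
--     for page, phrases in all_page_phrases.items():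
--         if any("consolidated balance sheet" in p.lower() for p in phrases):
--             if best is None or page < best:
--                 best = page
--     return best is not None and page_num >= best
-- ===== Notes on version B (the rewrite author's own statement) =====
-- stated objective: simpler
-- what changed: Replaces sort-the-keys-then-scan-with-break by a single unsorted pass over the dict items that keeps a running minimum matching page (first match in sorted order = minimum match).
import Mathlib
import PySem

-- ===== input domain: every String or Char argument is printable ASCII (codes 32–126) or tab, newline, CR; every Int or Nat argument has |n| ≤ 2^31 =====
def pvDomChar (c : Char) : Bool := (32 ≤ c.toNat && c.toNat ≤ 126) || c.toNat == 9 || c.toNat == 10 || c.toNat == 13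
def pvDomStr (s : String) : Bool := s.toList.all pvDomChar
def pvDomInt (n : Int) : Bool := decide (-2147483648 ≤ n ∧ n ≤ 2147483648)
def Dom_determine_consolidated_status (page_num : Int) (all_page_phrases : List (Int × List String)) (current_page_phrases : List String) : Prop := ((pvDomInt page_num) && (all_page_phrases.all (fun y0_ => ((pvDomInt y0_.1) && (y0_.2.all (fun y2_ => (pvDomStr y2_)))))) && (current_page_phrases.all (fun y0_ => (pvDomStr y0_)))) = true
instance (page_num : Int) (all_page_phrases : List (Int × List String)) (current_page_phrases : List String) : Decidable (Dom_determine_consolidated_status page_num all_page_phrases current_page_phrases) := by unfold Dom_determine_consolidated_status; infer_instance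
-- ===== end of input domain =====

-- B replaces sort-then-scan-with-break by one unsorted pass keeping the minimum matching page (simpler, no sort).

-- ===== PORT A =====
-- any("consolidated balance sheet" in phrase.lower() for phrase in phrases)
def dcsMatch (phrases : List String) : Bool :=
  phrases.any (fun phrase => PySem.Str.isIn "consolidated balance sheet" (PySem.Str.lower phrase))

-- all_page_phrases[page]: first-match association-list lookup (exact for a Python dict, whose keys are distinct)
def dcsLookup (d : List (Int × List String)) (k : Int) : List String :=
  ((d.find? (fun p => p.1 == k)).map Prod.snd).getD []

-- the 'for page in all_pages: … break' loop, returning consolidated_balance_sheet_page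
def dcsLoopA (d : List (Int × List String)) : List Int → Option Int
  | [] => none
  | page :: rest =>
      if dcsMatch (dcsLookup d page) then some page else dcsLoopA d rest

def determine_consolidated_status (page_num : Int) (all_page_phrases : List (Int × List String)) (current_page_phrases : List String) : Bool :=
  let all_pages := PySem.List.sorted (all_page_phrases.map Prod.fst) (fun x => x) false
  match dcsLoopA all_page_phrases all_pages with
  | none => false
  | some p => decide (page_num ≥ p)

-- ===== PORT B =====
-- the single pass: running minimum matching page
def dcsFoldB (d : List (Int × List String)) : Option Int :=
  d.foldl (fun best pr =>
    if dcsMatch pr.2 then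
      match best with
      | none => some pr.1
      | some b => if pr.1 < b then some pr.1 else some b
    else best) none

def determine_consolidated_status_alt (page_num : Int) (all_page_phrases : List (Int × List String)) (current_page_phrases : List String) : Bool :=
  match dcsFoldB all_page_phrases with
  | none => false
  | some b => decide (page_num ≥ b)

-- ===== PRECONDITION & SPEC =====
-- Pre_ excludes association lists with duplicate keys: they do not correspond to any Python dict
-- (Python A only ever receives dicts, whose keys are distinct), so nothing A returns on is excluded.
def Pre_determine_consolidated_status (page_num : Int) (all_page_phrases : List (Int × List String)) (current_page_phrases : List String) : Prop :=
  (all_page_phrases.map Prod.fst).Nodup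
instance (page_num : Int) (all_page_phrases : List (Int × List String)) (current_page_phrases : List String) : Decidable (Pre_determine_consolidated_status page_num all_page_phrases current_page_phrases) := by unfold Pre_determine_consolidated_status; infer_instance

def pvWitness_determine_consolidated_status : Int × (List (Int × List String)) × List String :=
  (3, [(5, ["cash flow"]), (2, ["Consolidated Balance Sheet"])], ["x"])

def Spec_determine_consolidated_status (page_num : Int) (all_page_phrases : List (Int × List String)) (current_page_phrases : List String) (out : Bool) : Prop := out = determine_consolidated_status_alt page_num all_page_phrases current_page_phrases
instance (page_num : Int) (all_page_phrases : List (Int × List String)) (current_page_phrases : List String) (out : Bool) : Decidable (Spec_determine_consolidated_status page_num all_page_phrases current_page_phrases out) := by unfold Spec_determine_consolidated_status; infer_instance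

-- ===== CLAIM (what is proved, stated in full; the proofs are below) =====
def Claim_equal_determine_consolidated_status : Prop := ∀ (page_num : Int) (all_page_phrases : List (Int × List String)) (current_page_phrases : List String), Dom_determine_consolidated_status page_num all_page_phrases current_page_phrases → Pre_determine_consolidated_status page_num all_page_phrases current_page_phrases → Spec_determine_consolidated_status page_num all_page_phrases current_page_phrases (determine_consolidated_status page_num all_page_phrases current_page_phrases)

-- ===== LEMMAS AND PROOFS =====

-- key-level predicate: does the (unique) phrase list of key k match
def dcsQ (d : List (Int × List String)) (k : Int) : Bool := dcsMatch (dcsLookup d k)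

-- the min-combining step of B, expressed on keys only
def dcsMin (best : Option Int) (k : Int) : Option Int :=
  match best with
  | none => some k
  | some b => if k < b then some k else some b

-- A's loop is find? of the key predicate
theorem dcsLoopA_eq_find? (d : List (Int × List String)) (l : List Int) :
    dcsLoopA d l = l.find? (dcsQ d) := by
  induction l with
  | nil => rfl
  | cons a t ih => simp [dcsLoopA, List.find?, dcsQ]; split_ifs with h <;> simp_all

-- under Nodup keys the stored value of a pair IS the lookup of its key
theorem dcsLookup_of_mem {d : List (Int × List String)} (h : (d.map Prod.fst).Nodup)
    {p : Int × List String} (hp : p ∈ d) : dcsLookup d p.1 = p.2 := by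
  induction d with
  | nil => simp at hp
  | cons a t ih =>
      simp only [List.map_cons, List.nodup_cons] at h
      rcases List.mem_cons.mp hp with rfl | hm
      · simp [dcsLookup]
      · have hne : ¬ (a.1 == p.1) = true := by
          simp only [beq_iff_eq]
          intro he
          exact h.1 (he ▸ List.mem_map_of_mem hm)
        simpa [dcsLookup, List.find?, hne] using ih h.2 hm

-- B's fold over pairs = min-fold over the filtered key list
theorem dcsFoldB_eq_foldl_min (d d' : List (Int × List String)) (acc : Option Int)
    (h : ∀ p ∈ d', dcsMatch p.2 = dcsQ d p.1) :
    d'.foldl (fun best pr =>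
      if dcsMatch pr.2 then
        match best with
        | none => some pr.1
        | some b => if pr.1 < b then some pr.1 else some b
      else best) acc
    = ((d'.map Prod.fst).filter (dcsQ d)).foldl dcsMin acc := by
  induction d' generalizing acc with
  | nil => rfl
  | cons a t ih =>
      have ha := h a (List.mem_cons_self)
      have ht : ∀ p ∈ t, dcsMatch p.2 = dcsQ d p.1 := fun p hp => h p (List.mem_cons_of_mem _ hp)
      by_cases hq : dcsQ d a.1 = true
      · simp [List.foldl_cons, ha, hq, ih _ ht, dcsMin]
      · have hq' : dcsQ d a.1 = false := by simpa using hq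
        simp [List.foldl_cons, ha, hq', ih _ ht]

-- a min-fold started at a value ≤ everything stays there
theorem foldl_dcsMin_of_le (t : List Int) (b : Int) (hb : ∀ x ∈ t, b ≤ x) :
    t.foldl dcsMin (some b) = some b := by
  induction t with
  | nil => rfl
  | cons a s ih =>
      have : ¬ a < b := not_lt.mpr (hb a (List.mem_cons_self))
      simp only [List.foldl_cons, dcsMin, if_neg this]
      exact ih (fun x hx => hb x (List.mem_cons_of_mem _ hx))

-- on a ≤-sorted list, find? = head of filter = min-fold of filter
theorem find?_eq_foldl_min_of_pairwise (l : List Int) (p : Int → Bool)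
    (h : l.Pairwise (· ≤ ·)) : l.find? p = (l.filter p).foldl dcsMin none := by
  induction l with
  | nil => rfl
  | cons a t ih =>
      rcases List.pairwise_cons.mp h with ⟨hle, ht⟩
      by_cases hp : p a = true
      · have : ∀ x ∈ t.filter p, a ≤ x := fun x hx => hle x (List.mem_of_mem_filter hx)
        simp [List.find?, hp, dcsMin, foldl_dcsMin_of_le _ _ this]
      · simp [List.find?, hp, ih ht]

-- dcsMin is the running minimum
theorem dcsMin_eq (o : Option Int) (k : Int) : dcsMin o k = some (min (o.getD k) k) := by
  cases o <;> simp only [dcsMin, Option.getD_some, Option.getD_none, min_self] <;>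
    split_ifs <;> simp_all <;> omega

-- the two-step min commutes
theorem dcsMin_comm (o : Option Int) (a b : Int) :
    dcsMin (dcsMin o a) b = dcsMin (dcsMin o b) a := by
  cases o <;> simp only [dcsMin_eq, Option.getD_some, Option.getD_none] <;> (congr 1; omega)

-- the min-fold is invariant under permutation
theorem foldl_dcsMin_perm {l₁ l₂ : List Int} (h : l₁.Perm l₂) (acc : Option Int) :
    l₁.foldl dcsMin acc = l₂.foldl dcsMin acc := by
  induction h generalizing acc with
  | nil => rfl
  | cons x _ ih => simp only [List.foldl_cons]; exact ih _
  | swap x y l => simp only [List.foldl_cons]; rw [dcsMin_comm]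
  | trans _ _ ih₁ ih₂ => rw [ih₁, ih₂]

-- ===== VERDICT (by name: the statement is the Claim_ definition above) =====
theorem determine_consolidated_status_spec : Claim_equal_determine_consolidated_status := by
  intro page_num d cpp _ hnd
  unfold Spec_determine_consolidated_status
  have hmatch : ∀ p ∈ d, dcsMatch p.2 = dcsQ d p.1 := by
    intro p hp; unfold dcsQ; rw [dcsLookup_of_mem hnd hp]
  have hperm : ((PySem.List.sorted (d.map Prod.fst) (fun x => x) false).filter (dcsQ d)).Perm
      ((d.map Prod.fst).filter (dcsQ d)) :=
    (PySem.List.sorted_perm (d.map Prod.fst) (fun x => x) false).filter _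
  have e : dcsLoopA d (PySem.List.sorted (d.map Prod.fst) (fun x => x) false) = dcsFoldB d := by
    unfold dcsFoldB
    rw [dcsFoldB_eq_foldl_min d d none hmatch, dcsLoopA_eq_find?,
      find?_eq_foldl_min_of_pairwise _ _
        (by simpa using PySem.List.sorted_pairwise (d.map Prod.fst) (fun x => x)),
      foldl_dcsMin_perm hperm]
  simp only [determine_consolidated_status, determine_consolidated_status_alt, e]
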